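-- pv_equiv track=rewrite | github.com/PrefectHQ/prefect | src/integrations/prefect-dbt/prefect_dbt/utilities.py | _parse_args_to_flag_groups
-- ===== SOURCE A (Python) =====
-- def _parse_args_to_flag_groups(args_list: list[str]) -> dict[str, list[str]]:
--     groups = {}
--     current_flag = None
--     positional = []
--
--     for arg in args_list:
--         if arg.startswith("--"):
--             current_flag = arg
--             groups[current_flag] = []
--         elif current_flag:
--             groups[current_flag].append(arg)
--         else:
--             # This is a positional argument (like the dbt command)
--             positional.append(arg)
--
--     # Store positional args with a special key
--     if positional:
--         groups["__positional__"] = positional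
--
--     return groups
-- ===== SOURCE B (Python) =====
-- def _parse_args_to_flag_groups(args_list: list[str]) -> dict[str, list[str]]:
--     # Chunking pass: split off the positional prefix, then cut the remainder
--     # into [flag, values...] chunks by scanning to the next "--" boundary.
--     n = len(args_list)
--     k = 0
--     while k < n and not args_list[k].startswith("--"):
--         k += 1
--     positional = args_list[:k]
--     groups = {}
--     rest = args_list[k:]
--     while rest:
--         flag, tail = rest[0], rest[1:]
--         j = 0
--         while j < len(tail) and not tail[j].startswith("--"):
--             j += 1
--         groups[flag] = tail[:j]
--         rest = tail[j:]
--     if positional: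
--         groups["__positional__"] = positional
--     return groups
-- ===== Notes on version B (the rewrite author's own statement) =====
-- stated objective: alternative
-- what changed: Replaces A's element-by-element state machine (current_flag + per-element dict append) with a chunking pass that scans to each '--' boundary and assigns whole value slices per flag.
import Mathlib
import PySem

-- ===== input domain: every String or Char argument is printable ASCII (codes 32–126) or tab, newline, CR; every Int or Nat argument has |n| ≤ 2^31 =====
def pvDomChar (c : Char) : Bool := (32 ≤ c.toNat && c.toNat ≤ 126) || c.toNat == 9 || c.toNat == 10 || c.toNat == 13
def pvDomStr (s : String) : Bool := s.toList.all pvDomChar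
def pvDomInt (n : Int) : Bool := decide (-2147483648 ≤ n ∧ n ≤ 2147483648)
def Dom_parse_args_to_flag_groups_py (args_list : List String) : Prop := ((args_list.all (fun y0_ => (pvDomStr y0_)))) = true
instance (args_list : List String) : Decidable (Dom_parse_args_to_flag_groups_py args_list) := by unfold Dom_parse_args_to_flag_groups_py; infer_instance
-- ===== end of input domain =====

-- B replaces A's current_flag state machine with a boundary-chunking pass (alternative decomposition, same cost).

-- ===== PORT A =====
-- one loop step of A: state = (groups, current_flag, positional)
def pvStepA (st : PySem.Dict String (List String) × Option String × List String) (arg : String) :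
    PySem.Dict String (List String) × Option String × List String :=
  if PySem.Str.startswith arg "--" then
    (st.1.insert arg [], some arg, st.2.2)
  else
    match st.2.1 with
    | some cf => (st.1.modify cf [] (fun l => l ++ [arg]), some cf, st.2.2)
    | none => (st.1, none, st.2.2 ++ [arg])

def parse_args_to_flag_groups_py (args_list : List String) : List (String × List String) :=
  let st := args_list.foldl pvStepA (PySem.Dict.empty, none, [])
  let groups := if st.2.2 ≠ [] then st.1.insert "__positional__" st.2.2 else st.1
  groups.items

-- ===== PORT B =====
def pvIsFlag (a : String) : Bool := PySem.Str.startswith a "--"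

-- the index-scan 'while j < len and not xs[j].startswith("--"): j += 1' as structural recursion
def pvScanLen : List String → Nat
  | [] => 0
  | a :: t => if pvIsFlag a then 0 else pvScanLen t + 1

-- the chunking 'while rest:' loop; slices xs[:j] / xs[j:] with 0 ≤ j ≤ len are take/drop (exact here)
def pvAltGo : List String → PySem.Dict String (List String) → PySem.Dict String (List String)
  | [], d => d
  | f :: tail, d =>
      let j := pvScanLen tail
      pvAltGo (tail.drop j) (d.insert f (tail.take j))
termination_by xs _ => xs.length
decreasing_by simpa using Nat.lt_succ_of_le (List.length_drop_le _ _)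

def parse_args_to_flag_groups_py_alt (args_list : List String) : List (String × List String) :=
  let k := pvScanLen args_list
  let positional := args_list.take k
  let groups := pvAltGo (args_list.drop k) PySem.Dict.empty
  let groups := if positional ≠ [] then groups.insert "__positional__" positional else groups
  groups.items

-- ===== PRECONDITION & SPEC =====
def Spec_parse_args_to_flag_groups_py (args_list : List String) (out : List (String × List String)) : Prop := out = parse_args_to_flag_groups_py_alt args_list
instance (args_list : List String) (out : List (String × List String)) : Decidable (Spec_parse_args_to_flag_groups_py args_list out) := by unfold Spec_parse_args_to_flag_groups_py; infer_instance

-- ===== CLAIM (what is proved, stated in full; the proofs are below) =====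
def Claim_equal_parse_args_to_flag_groups_py : Prop := ∀ (args_list : List String), Dom_parse_args_to_flag_groups_py args_list → Spec_parse_args_to_flag_groups_py args_list (parse_args_to_flag_groups_py args_list)

-- ===== LEMMAS AND PROOFS =====

-- appending to the value just inserted at k rewrites that value in place
theorem pv_modify_insert (d : PySem.Dict String (List String)) (k : String) (v : List String)
    (g : List String → List String) : (d.insert k v).modify k [] g = d.insert k (g v) := by
  simp [PySem.Dict.modify, PySem.Dict.getD_insert_self, PySem.Dict.insert_insert_self]

-- scanLen marks the takeWhile/dropWhile boundary
theorem pv_take_scanLen (xs : List String) :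
    xs.take (pvScanLen xs) = xs.takeWhile (fun a => !pvIsFlag a) := by
  induction xs with
  | nil => rfl
  | cons a t ih =>
    by_cases h : pvIsFlag a = true <;> simp [pvScanLen, h, ih]

theorem pv_drop_scanLen (xs : List String) :
    xs.drop (pvScanLen xs) = xs.dropWhile (fun a => !pvIsFlag a) := by
  induction xs with
  | nil => rfl
  | cons a t ih =>
    by_cases h : pvIsFlag a = true <;> simp [pvScanLen, h, ih]

-- A's loop from the flag phase (current flag f, its value so far acc) equals B's chunking
theorem pv_foldl_flag (xs : List String) (d : PySem.Dict String (List String))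
    (f : String) (acc p : List String) :
    (xs.foldl pvStepA (d.insert f acc, some f, p)).1
      = pvAltGo (xs.dropWhile (fun a => !pvIsFlag a))
          (d.insert f (acc ++ xs.takeWhile (fun a => !pvIsFlag a)))
    ∧ (xs.foldl pvStepA (d.insert f acc, some f, p)).2.2 = p := by
  induction xs generalizing d f acc with
  | nil => simp [pvAltGo]
  | cons a t ih =>
    by_cases ha : pvIsFlag a = true
    · have ha' : PySem.Str.startswith a "--" = true := ha
      simp only [List.foldl_cons, pvStepA, ha', List.dropWhile_cons,
        List.takeWhile_cons, ha, Bool.not_true, reduceIte]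
      have h := ih (d.insert f acc) a []
      refine ⟨?_, h.2⟩
      rw [h.1]
      simp [pvAltGo, pv_take_scanLen, pv_drop_scanLen]
    · have ha' : PySem.Str.startswith a "--" = false := by simpa [pvIsFlag] using ha
      simp only [List.foldl_cons, pvStepA, ha', Bool.false_eq_true, if_false,
        pv_modify_insert, List.dropWhile_cons, List.takeWhile_cons, ha, Bool.not_false,
        reduceIte]
      have h := ih d f (acc ++ [a])
      refine ⟨?_, h.2⟩
      rw [h.1]
      simp

-- A's loop from the initial (positional) phase: dict = B's chunking of the flag part,
-- positional = the non-flag prefix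
theorem pv_foldl_none (xs : List String) (d : PySem.Dict String (List String)) (p : List String) :
    (xs.foldl pvStepA (d, none, p)).1 = pvAltGo (xs.dropWhile (fun a => !pvIsFlag a)) d
    ∧ (xs.foldl pvStepA (d, none, p)).2.2 = p ++ xs.takeWhile (fun a => !pvIsFlag a) := by
  induction xs generalizing p with
  | nil => simp [pvAltGo]
  | cons a t ih =>
    by_cases ha : pvIsFlag a = true
    · have ha' : PySem.Str.startswith a "--" = true := ha
      simp only [List.foldl_cons, pvStepA, ha', List.dropWhile_cons,
        List.takeWhile_cons, ha, Bool.not_true, reduceIte]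
      have h := pv_foldl_flag t d a [] p
      refine ⟨?_, by simpa using h.2⟩
      rw [h.1]
      simp [pvAltGo, pv_take_scanLen, pv_drop_scanLen]
    · have ha' : PySem.Str.startswith a "--" = false := by simpa [pvIsFlag] using ha
      simp only [List.foldl_cons, pvStepA, ha', Bool.false_eq_true, if_false,
        List.dropWhile_cons, List.takeWhile_cons, ha, Bool.not_false, reduceIte]
      have h := ih (p ++ [a])
      exact ⟨h.1, by rw [h.2]; simp⟩

-- ===== VERDICT (by name: the statement is the Claim_ definition above) =====
theorem parse_args_to_flag_groups_py_spec : Claim_equal_parse_args_to_flag_groups_py := by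
  intro args _
  unfold Spec_parse_args_to_flag_groups_py
  simp only [parse_args_to_flag_groups_py, parse_args_to_flag_groups_py_alt,
    pv_take_scanLen, pv_drop_scanLen]
  have h := pv_foldl_none args PySem.Dict.empty []
  rw [h.1, h.2, List.nil_append]
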